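-- pv_equiv track=rewrite | github.com/csscuwa/election_counting_script | count.py | check_vote_valid
-- ===== SOURCE A (Python) =====
-- def check_vote_valid(paper, numberCandidates):
--     if(len(paper)!=numberCandidates):
--         return False
--
--     missingVotes = False
--
--     paper = list(filter(None, paper))
--     try:
--         paper = [int(x) for x in paper]
--     except:
--         missingVotes = True
--     else:
--         paper = sorted(paper)
--         for i in range(len(paper)):
--             if(i+1 != paper[i]):
--                 missingVotes = True
--
--     if(missingVotes):
--         return False
--     else:
--         return True
-- ===== SOURCE B (Python) =====
-- def check_vote_valid(paper, numberCandidates):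
--     if len(paper) != numberCandidates:
--         return False
--     vals = list(filter(None, paper))
--     try:
--         vals = [int(x) for x in vals]
--     except:
--         return False
--     seen = [False] * len(vals)
--     for v in vals:
--         if v < 1 or len(seen) < v or seen[v - 1]:
--             return False
--         seen[v - 1] = True
--     return True
-- ===== Notes on version B (the rewrite author's own statement) =====
-- stated objective: alternative
-- what changed: Replaces A's sort + index-walk + sticky missingVotes flag by a single marking pass over a boolean 'seen' array (early-return on out-of-range or duplicate values); the length guard and the filter/int-parsing prefix are kept.
import Mathlib
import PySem

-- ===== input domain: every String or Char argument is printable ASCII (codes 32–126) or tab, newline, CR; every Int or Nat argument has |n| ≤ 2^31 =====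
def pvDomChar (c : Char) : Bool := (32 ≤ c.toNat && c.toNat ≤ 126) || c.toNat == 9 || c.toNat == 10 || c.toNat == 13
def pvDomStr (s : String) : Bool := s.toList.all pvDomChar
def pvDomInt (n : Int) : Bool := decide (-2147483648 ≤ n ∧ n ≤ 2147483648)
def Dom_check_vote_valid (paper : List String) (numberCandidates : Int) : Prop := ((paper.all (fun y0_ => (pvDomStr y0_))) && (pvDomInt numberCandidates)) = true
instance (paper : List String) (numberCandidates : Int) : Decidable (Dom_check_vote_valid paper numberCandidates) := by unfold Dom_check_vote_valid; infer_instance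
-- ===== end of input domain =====

-- ===== PORT A =====
-- One-line: B replaces A's sort + index walk + sticky missingVotes flag by a single
-- marking pass over a boolean 'seen' array; length guard and filter/int-parsing are shared.
def check_vote_valid (paper : List String) (numberCandidates : Int) : Bool :=
  if ((paper.length : Int) ≠ numberCandidates) then false
  else
    let paper1 := paper.filter (fun s => s ≠ "")         -- list(filter(None, paper))
    match paper1.mapM PySem.Int.ofStr? with               -- [int(x) for x in paper]; none = ValueError
    | none => false                                        -- except: missingVotes = True → return False
    | some ints =>
      let srt := PySem.List.sorted ints (fun x => x) false
      let missing := (PySem.List.pyRange 0 (srt.length : Int) 1).foldl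
        (fun m i => if (i + 1 ≠ PySem.List.pyGetD srt i 0) then true else m) false
      if missing then false else true

-- ===== PORT B =====
-- the marking loop: for v in vals: if v<1 or len(seen)<v or seen[v-1]: return False; seen[v-1]=True
def pvMark : List Int → List Bool → Bool
  | [], _ => true
  | v :: vs, seen =>
    if v < 1 ∨ (seen.length : Int) < v ∨ seen.getD (v - 1).toNat false then false
    else pvMark vs (seen.set (v - 1).toNat true)

def check_vote_valid_alt (paper : List String) (numberCandidates : Int) : Bool :=
  if ((paper.length : Int) ≠ numberCandidates) then false
  else
    match (paper.filter (fun s => s ≠ "")).mapM PySem.Int.ofStr? with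
    | none => false
    | some vals => pvMark vals (List.replicate vals.length false)

-- ===== PRECONDITION & SPEC =====
def Spec_check_vote_valid (paper : List String) (numberCandidates : Int) (out : Bool) : Prop := out = check_vote_valid_alt paper numberCandidates
instance (paper : List String) (numberCandidates : Int) (out : Bool) : Decidable (Spec_check_vote_valid paper numberCandidates out) := by unfold Spec_check_vote_valid; infer_instance

-- ===== CLAIM (what is proved, stated in full; the proofs are below) =====
def Claim_equal_check_vote_valid : Prop := ∀ (paper : List String) (numberCandidates : Int), Dom_check_vote_valid paper numberCandidates → Spec_check_vote_valid paper numberCandidates (check_vote_valid paper numberCandidates)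

-- ===== LEMMAS AND PROOFS =====

-- the sticky-true flag: missingVotes is an 'any' over the range
theorem pv_foldl_sticky (p : Int → Prop) [DecidablePred p] (l : List Int) (b : Bool) :
    l.foldl (fun m i => if p i then true else m) b = (b || l.any (fun i => decide (p i))) := by
  induction l generalizing b with
  | nil => simp
  | cons x xs ih => simp only [List.foldl_cons, List.any_cons, ih]; by_cases h : p x <;> simp [h]

-- A's loop condition characterises 'xs = [1..n]'
theorem pv_loop_iff (xs : List Int) :
    ((PySem.List.pyRange 0 (xs.length : Int) 1).all
        (fun i => decide (i + 1 = PySem.List.pyGetD xs i 0)) = true)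
      ↔ xs = PySem.List.pyRange 1 ((xs.length : Int) + 1) 1 := by
  rw [List.all_eq_true]
  constructor
  · intro h
    apply List.ext_getElem
    · simp [PySem.List.length_pyRange_one]
    · intro k hk hk2
      have hmem : ((k : Int)) ∈ PySem.List.pyRange 0 (xs.length : Int) 1 := by
        rw [PySem.List.mem_pyRange_one]; omega
      have h1 := h _ hmem
      rw [decide_eq_true_eq, PySem.List.pyGetD_natCast, List.getD_eq_getElem xs 0 hk] at h1
      rw [PySem.List.getElem_pyRange_one]
      omega
  · intro h i hi
    rw [PySem.List.mem_pyRange_one] at hi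
    have hk : i.toNat < xs.length := by omega
    have hi' : i = ((i.toNat : Nat) : Int) := by omega
    rw [decide_eq_true_eq, hi', PySem.List.pyGetD_natCast, List.getD_eq_getElem xs 0 hk]
    have hk2 : i.toNat < (PySem.List.pyRange 1 ((xs.length : Int) + 1) 1).length := by
      rw [PySem.List.length_pyRange_one]; omega
    have hx : xs[i.toNat] = (PySem.List.pyRange 1 ((xs.length : Int) + 1) 1)[i.toNat] :=
      List.getElem_of_eq h hk
    rw [hx, PySem.List.getElem_pyRange_one]
    omega

-- A's verdict on the parsed ints is true exactly when ints is a permutation of [1..n]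
theorem pvA_iff (ints : List Int) :
    ((if (PySem.List.pyRange 0 ((PySem.List.sorted ints (fun x => x) false).length : Int) 1).foldl
          (fun m i => if (i + 1 ≠ PySem.List.pyGetD (PySem.List.sorted ints (fun x => x) false) i 0)
            then true else m) false
      then false else true) = true)
    ↔ ints.Perm (PySem.List.pyRange 1 ((ints.length : Int) + 1) 1) := by
  set srt := PySem.List.sorted ints (fun x => x) false with hsrt
  have hperm0 : srt.Perm ints := PySem.List.sorted_perm ints (fun x : Int => x) false
  have hlen : srt.length = ints.length := hperm0.length_eq
  rw [pv_foldl_sticky (fun i => i + 1 ≠ PySem.List.pyGetD srt i 0)]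
  simp only [Bool.false_or]
  constructor
  · intro h
    have hany : (PySem.List.pyRange 0 (srt.length : Int) 1).any
        (fun i => decide (i + 1 ≠ PySem.List.pyGetD srt i 0)) = false := by
      by_contra hc
      rw [Bool.not_eq_false] at hc
      rw [hc] at h; simp at h
    have hall : (PySem.List.pyRange 0 (srt.length : Int) 1).all
        (fun i => decide (i + 1 = PySem.List.pyGetD srt i 0)) = true := by
      rw [List.all_eq_true]; intro x hx
      rw [List.any_eq_false] at hany
      simpa using hany x hx
    have hA := (pv_loop_iff srt).mp hall
    rw [hlen] at hA
    exact hperm0.symm.trans (hA ▸ List.Perm.refl srt)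
  · intro hp
    have hA : srt = PySem.List.pyRange 1 ((srt.length : Int) + 1) 1 := by
      rw [hlen]
      exact PySem.List.sorted_eq_of_perm_of_pairwise_lt (xs := ints)
        (ys := PySem.List.pyRange 1 ((ints.length : Int) + 1) 1) (key := fun x : Int => x)
        hp.symm (by simpa using PySem.List.pairwise_lt_pyRange_one (a := (1:Int)) (b := (ints.length : Int) + 1))
    have hall := (pv_loop_iff srt).mpr hA
    rw [List.all_eq_true] at hall
    have hany : (PySem.List.pyRange 0 (srt.length : Int) 1).any
        (fun i => decide (i + 1 ≠ PySem.List.pyGetD srt i 0)) = false := by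
      rw [List.any_eq_false]; intro x hx; simpa using hall x hx
    rw [hany]; rfl

-- invariant of the marking loop
theorem pv_getD_set (seen : List Bool) (i j : Nat) (b : Bool) (_hi : i < seen.length)
    (hj : j < seen.length) :
    (seen.set i b).getD j false = if i = j then b else seen.getD j false := by
  rw [List.getD_eq_getElem _ _ (by simpa using hj), List.getD_eq_getElem _ _ hj,
    List.getElem_set]

theorem pvMark_iff (vs : List Int) (seen : List Bool) :
    pvMark vs seen = true ↔
      vs.Nodup ∧ ∀ v ∈ vs, 1 ≤ v ∧ v ≤ (seen.length : Int) ∧ seen.getD (v - 1).toNat false = false := by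
  induction vs generalizing seen with
  | nil => simp [pvMark]
  | cons v vs ih =>
    rw [pvMark]
    by_cases hc : v < 1 ∨ (seen.length : Int) < v ∨ seen.getD (v - 1).toNat false
    · rw [if_pos hc]
      apply iff_of_false (by simp)
      rintro ⟨_, hall⟩
      have := hall v (List.mem_cons_self ..)
      rcases hc with h | h | h
      · omega
      · omega
      · rw [this.2.2] at h; exact Bool.false_ne_true h
    · rw [if_neg hc]
      push Not at hc
      obtain ⟨h1, h2, h3⟩ := hc
      rw [ne_eq, Bool.not_eq_true] at h3
      have hidx : (v - 1).toNat < seen.length := by omega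
      rw [ih]
      constructor
      · rintro ⟨hnd, hall⟩
        refine ⟨?_, fun w hw => ?_⟩
        · rw [List.nodup_cons]
          refine ⟨fun hv => ?_, hnd⟩
          have h4 := (hall v hv).2.2
          rw [pv_getD_set seen _ _ true hidx hidx, if_pos rfl] at h4
          exact absurd h4 (by simp)
        · rcases List.mem_cons.mp hw with rfl | hw
          · exact ⟨by omega, by omega, h3⟩
          · have ⟨hw1, hw2, hw3⟩ := hall w hw
            rw [List.length_set] at hw2
            have hwidx : (w - 1).toNat < seen.length := by omega
            rw [pv_getD_set seen _ _ true hidx hwidx] at hw3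
            refine ⟨hw1, hw2, ?_⟩
            by_cases hne : (v - 1).toNat = (w - 1).toNat
            · rw [if_pos hne] at hw3; exact absurd hw3 (by simp)
            · rwa [if_neg hne] at hw3
      · rintro ⟨hnd, hall⟩
        rw [List.nodup_cons] at hnd
        refine ⟨hnd.2, fun w hw => ?_⟩
        have ⟨hw1, hw2, hw3⟩ := hall w (List.mem_cons_of_mem v hw)
        have hwv : w ≠ v := fun h => hnd.1 (h ▸ hw)
        have hne : (v - 1).toNat ≠ (w - 1).toNat := by omega
        have hwidx : (w - 1).toNat < seen.length := by omega
        refine ⟨hw1, by rw [List.length_set]; omega, ?_⟩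
        rw [pv_getD_set seen _ _ true hidx hwidx, if_neg hne]
        exact hw3

-- B's verdict on the parsed ints is true exactly when ints is a permutation of [1..n]
theorem pvB_iff (ints : List Int) :
    (pvMark ints (List.replicate ints.length false) = true)
      ↔ ints.Perm (PySem.List.pyRange 1 ((ints.length : Int) + 1) 1) := by
  rw [pvMark_iff]
  have hgd : ∀ k : Nat, (List.replicate ints.length false).getD k false = false := by
    intro k
    by_cases h : k < ints.length
    · rw [List.getD_eq_getElem _ _ (by simpa using h)]; simp
    · rw [List.getD_eq_default]; simp; omega
  constructor
  · rintro ⟨hnd, hall⟩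
    have hsub : ints ⊆ PySem.List.pyRange 1 ((ints.length : Int) + 1) 1 := by
      intro v hv
      have := hall v hv
      rw [PySem.List.mem_pyRange_one]
      simp only [List.length_replicate] at this
      omega
    have hsp := hnd.subperm hsub
    exact hsp.perm_of_length_le (by rw [PySem.List.length_pyRange_one]; omega)
  · intro hp
    have hnd : ints.Nodup := hp.nodup_iff.mpr (PySem.List.nodup_pyRange_one _ _)
    refine ⟨hnd, fun v hv => ?_⟩
    have hv2 := hp.mem_iff.mp hv
    rw [PySem.List.mem_pyRange_one] at hv2
    exact ⟨by omega, by rw [List.length_replicate]; omega, hgd _⟩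

-- ===== VERDICT (by name: the statement is the Claim_ definition above) =====
theorem check_vote_valid_spec : Claim_equal_check_vote_valid := by
  intro paper numberCandidates _
  unfold Spec_check_vote_valid check_vote_valid check_vote_valid_alt
  by_cases hlen : ((paper.length : Int) ≠ numberCandidates)
  · rw [if_pos hlen, if_pos hlen]
  · rw [if_neg hlen, if_neg hlen]
    dsimp only
    cases hm : (paper.filter (fun s => s ≠ "")).mapM PySem.Int.ofStr? with
    | none => rfl
    | some ints =>
      dsimp only
      exact Bool.eq_iff_iff.mpr ((pvA_iff ints).trans (pvB_iff ints).symm)
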